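-- pv_equiv track=rewrite | github.com/yoelcolque/logica | listas/videos.py | es_diptongo
-- ===== SOURCE A (Python) =====
-- v_c = ('i','u')
--
-- v_a = ('a','e','o')
--
-- def es_diptongo (palabra):
--     condicion = False
--     indice = 0
--     while not condicion and indice < len(palabra) - 1:
--         if (palabra[indice] in v_a and palabra[indice + 1] in v_c) or (palabra[indice] in v_c and palabra[indice+1] in v_c):
--             condicion = True
--         indice += 1
--     return condicion
-- ===== SOURCE B (Python) =====
-- DIPTONGOS = ("ai", "ei", "oi", "ii", "ui", "au", "eu", "ou", "iu", "uu")
--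
-- def es_diptongo(palabra):
--     return any(d in palabra for d in DIPTONGOS)
-- ===== Notes on version B (the rewrite author's own statement) =====
-- stated objective: faster
-- what changed: Instead of an indexed while-loop with a flag testing vowel-class membership of adjacent characters, B enumerates the ten concrete diphthong bigrams and asks whether any occurs as a substring of the word, delegating the scan to the native substring containment operator.
import Mathlib
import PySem

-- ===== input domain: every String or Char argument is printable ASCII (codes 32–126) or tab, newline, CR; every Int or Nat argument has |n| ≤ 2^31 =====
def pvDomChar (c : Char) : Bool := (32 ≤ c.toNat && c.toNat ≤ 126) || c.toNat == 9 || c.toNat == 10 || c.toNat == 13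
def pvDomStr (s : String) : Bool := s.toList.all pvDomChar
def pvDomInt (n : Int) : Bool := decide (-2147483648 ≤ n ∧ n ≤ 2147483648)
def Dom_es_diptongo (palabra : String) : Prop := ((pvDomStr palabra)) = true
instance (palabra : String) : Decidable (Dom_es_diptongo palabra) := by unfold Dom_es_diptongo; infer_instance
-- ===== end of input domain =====

-- B replaces A's indexed while-loop/flag scan by checking each of the ten concrete
-- diphthong bigrams for substring occurrence (idiomatic; same behaviour on strings).

-- ===== PORT A =====
def v_c : List Char := ['i', 'u']
def v_a : List Char := ['a', 'e', 'o']

-- A's while loop: state (condicion, indice); every access is in range, so getD is exact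
def esDipLoop (cs : List Char) (condicion : Bool) (indice : Nat) : Bool :=
  if ¬condicion ∧ indice + 1 < cs.length then
    let condicion' :=
      if (cs.getD indice ' ' ∈ v_a && cs.getD (indice + 1) ' ' ∈ v_c) ||
         (cs.getD indice ' ' ∈ v_c && cs.getD (indice + 1) ' ' ∈ v_c) then true else condicion
    esDipLoop cs condicion' (indice + 1)
  else condicion
termination_by cs.length - indice
decreasing_by omega

def es_diptongo (palabra : String) : Bool := esDipLoop palabra.toList false 0

-- ===== PORT B =====
-- Python's `d in palabra` substring test, for the two-character patterns B uses
-- (exact: a length-2 substring occurs iff it matches at some adjacent position)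
def hasBigram (c d : Char) : List Char → Bool
  | x :: y :: rest => (x == c && y == d) || hasBigram c d (y :: rest)
  | _ => false

def DIPTONGOS : List (Char × Char) :=
  [('a','i'), ('e','i'), ('o','i'), ('i','i'), ('u','i'),
   ('a','u'), ('e','u'), ('o','u'), ('i','u'), ('u','u')]

def es_diptongo_alt (palabra : String) : Bool :=
  DIPTONGOS.any (fun p => hasBigram p.1 p.2 palabra.toList)

-- ===== PRECONDITION & SPEC =====
def Spec_es_diptongo (palabra : String) (out : Bool) : Prop := out = es_diptongo_alt palabra
instance (palabra : String) (out : Bool) : Decidable (Spec_es_diptongo palabra out) := by unfold Spec_es_diptongo; infer_instance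

-- ===== CLAIM (what is proved, stated in full; the proofs are below) =====
def Claim_equal_es_diptongo : Prop := ∀ (palabra : String), Dom_es_diptongo palabra → Spec_es_diptongo palabra (es_diptongo palabra)

-- ===== LEMMAS AND PROOFS =====

-- A's pair condition, as a predicate on two characters
def pairCond (x y : Char) : Bool :=
  (x ∈ v_a && y ∈ v_c) || (x ∈ v_c && y ∈ v_c)

-- the common reference form: does some adjacent pair satisfy A's condition
def existsAdj : List Char → Bool
  | x :: y :: rest => pairCond x y || existsAdj (y :: rest)
  | _ => false

lemma esDipLoop_true (cs : List Char) (i : Nat) : esDipLoop cs true i = true := by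
  unfold esDipLoop; simp

lemma esDipLoop_eq_existsAdj (cs : List Char) (i : Nat) :
    esDipLoop cs false i = existsAdj (cs.drop i) := by
  unfold esDipLoop
  by_cases h : i + 1 < cs.length
  · simp only [h, and_true]
    have hd : cs.drop i = cs[i] :: cs.drop (i + 1) := List.drop_eq_getElem_cons (by omega)
    have hd2 : cs.drop (i + 1) = cs[i + 1] :: cs.drop (i + 2) := List.drop_eq_getElem_cons h
    have hg1 : cs.getD i ' ' = cs[i] := List.getD_eq_getElem _ _ (by omega)
    have hg2 : cs.getD (i + 1) ' ' = cs[i + 1] := List.getD_eq_getElem _ _ h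
    by_cases hc : ((cs.getD i ' ' ∈ v_a && cs.getD (i+1) ' ' ∈ v_c) ||
                   (cs.getD i ' ' ∈ v_c && cs.getD (i+1) ' ' ∈ v_c)) = true
    · rw [if_pos hc, esDipLoop_true]
      rw [hg1, hg2] at hc
      rw [hd, hd2]
      simp only [existsAdj, pairCond, hc, Bool.true_or]
      simp
    · rw [if_neg hc, esDipLoop_eq_existsAdj cs (i + 1)]
      rw [hg1, hg2] at hc
      simp only [Bool.not_eq_true] at hc
      rw [hd, hd2]
      simp only [existsAdj, pairCond, hc, Bool.false_or]
      rw [← hd2]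
      simp
  · simp only [h, and_false]
    rcases hdrop : cs.drop i with _ | ⟨x, rest⟩
    · simp [existsAdj]
    · have : rest = [] := by
        have hlen := congrArg List.length hdrop
        simp [List.length_drop] at hlen
        have : rest.length = 0 := by omega
        exact List.length_eq_zero_iff.mp this
      simp [existsAdj, this]
termination_by cs.length - i
decreasing_by omega

-- the enumerated bigram table matches A's two-clause vowel condition pointwise
lemma pairs_match (x y : Char) :
    (DIPTONGOS.any (fun p => x == p.1 && y == p.2)) = pairCond x y := by
  apply Bool.eq_iff_iff.mpr
  simp only [DIPTONGOS, pairCond, v_a, v_c, List.any_cons, List.any_nil,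
    Bool.or_eq_true, Bool.and_eq_true, beq_iff_eq, List.mem_cons, List.not_mem_nil,
    decide_eq_true_eq, or_false]
  tauto

lemma any_orB {α : Type} (l : List α) (f g : α → Bool) :
    (l.any fun a => f a || g a) = (l.any f || l.any g) := by
  induction l with
  | nil => simp
  | cons h t ih =>
    simp [List.any_cons, ih, Bool.or_assoc, Bool.or_left_comm]

lemma bigrams_eq_existsAdj (cs : List Char) :
    (DIPTONGOS.any fun p => hasBigram p.1 p.2 cs) = existsAdj cs := by
  match cs with
  | [] => simp [hasBigram, existsAdj]
  | [x] => simp [hasBigram, existsAdj]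
  | x :: y :: rest =>
    have : (DIPTONGOS.any fun p => hasBigram p.1 p.2 (x :: y :: rest))
        = (DIPTONGOS.any fun p => (x == p.1 && y == p.2) || hasBigram p.1 p.2 (y :: rest)) := by
      simp only [hasBigram]
    rw [this, any_orB, pairs_match, bigrams_eq_existsAdj (y :: rest)]
    simp [existsAdj]

-- ===== VERDICT (by name: the statement is the Claim_ definition above) =====
theorem es_diptongo_spec : Claim_equal_es_diptongo := by
  intro palabra _
  unfold Spec_es_diptongo es_diptongo es_diptongo_alt
  rw [esDipLoop_eq_existsAdj, bigrams_eq_existsAdj]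
  simp
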